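-- pv_equiv track=rewrite | github.com/sep037/CodingTest | 프로그래머스/2/12924. 숫자의 표현/숫자의 표현.py | solution
-- ===== SOURCE A (Python) =====
-- def solution(n):
--     count = 0  # 방법의 수를 저장할 변수
--     m = 1  # 연속된 자연수의 개수를 나타내는 변수
--
--     while (m * (m - 1)) // 2 < n:
--         if (n - (m * (m - 1)) // 2) % m == 0:
--             count += 1
--         m += 1
--
--     return count
-- ===== SOURCE B (Python) =====
-- def solution(n):
--     # Counts the odd divisors of n (representations of n as a sum of
--     # consecutive naturals biject with odd divisors), scanning divisor
--     # pairs (d, n // d) only up to the square root of n.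
--     if n <= 0:
--         return 0
--     count = 0
--     d = 1
--     while d * d <= n:
--         if n % d == 0:
--             if d % 2 == 1:
--                 count += 1
--             q = n // d
--             if q != d and q % 2 == 1:
--                 count += 1
--         d += 1
--     return count
-- ===== Notes on version B (the rewrite author's own statement) =====
-- stated objective: alternative
-- what changed: B counts the odd divisors of n by scanning divisor pairs (d, n//d) up to sqrt(n), instead of A's scan over every run length m testing whether a consecutive sum of length m hits n.
import Mathlib
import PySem

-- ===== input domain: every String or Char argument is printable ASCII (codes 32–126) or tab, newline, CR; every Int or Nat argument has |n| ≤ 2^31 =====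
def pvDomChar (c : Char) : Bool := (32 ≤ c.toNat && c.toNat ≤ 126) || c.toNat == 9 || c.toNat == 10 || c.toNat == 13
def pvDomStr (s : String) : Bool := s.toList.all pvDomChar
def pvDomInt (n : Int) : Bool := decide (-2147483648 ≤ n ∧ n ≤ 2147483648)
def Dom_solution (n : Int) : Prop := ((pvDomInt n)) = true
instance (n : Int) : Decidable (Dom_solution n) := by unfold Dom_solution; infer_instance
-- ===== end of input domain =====

-- B counts the odd divisors of n by scanning divisor pairs up to sqrt(n) instead of A's scan over run lengths of consecutive sums; same asymptotic cost, different algorithm.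

-- ===== PORT A =====
-- The while loop as structural recursion on a fuel counter (a totality guard only:
-- the loop leaves once m*(m-1)//2 >= n and m increments each pass, so n.toNat + 2
-- passes always suffice, as pv_loopA proves); the body is step for step A's loop.
def solutionLoop (n count m : Int) (fuel : Nat) : Int :=
  match fuel with
  | 0 => count
  | fuel + 1 =>
    if PySem.Int.floordiv (m * (m - 1)) 2 < n then
      solutionLoop n
        (if PySem.Int.mod (n - PySem.Int.floordiv (m * (m - 1)) 2) m = 0 then count + 1 else count)
        (m + 1) fuel
    else count

def solution (n : Int) : Int := solutionLoop n 0 1 (n.toNat + 2)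

-- ===== PORT B =====
-- Source B's while loop, same fuel-guard scheme (d*d ≤ n fails once d exceeds sqrt n,
-- so n.toNat + 2 passes always suffice, as pv_loopB proves); body step for step Source B's.
def solutionAltLoop (n count d : Int) (fuel : Nat) : Int :=
  match fuel with
  | 0 => count
  | fuel + 1 =>
    if d * d ≤ n then
      solutionAltLoop n
        (if PySem.Int.mod n d = 0 then
          (let count := if PySem.Int.mod d 2 = 1 then count + 1 else count
           let q := PySem.Int.floordiv n d
           if q ≠ d ∧ PySem.Int.mod q 2 = 1 then count + 1 else count)
         else count)
        (d + 1) fuel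
    else count

def solution_alt (n : Int) : Int :=
  if n ≤ 0 then 0 else solutionAltLoop n 0 1 (n.toNat + 2)

-- ===== PRECONDITION & SPEC =====
def Spec_solution (n : Int) (out : Int) : Prop := out = solution_alt n
instance (n : Int) (out : Int) : Decidable (Spec_solution n out) := by unfold Spec_solution; infer_instance

-- ===== CLAIM (what is proved, stated in full; the proofs are below) =====
def Claim_equal_solution : Prop := ∀ (n : Int), Dom_solution n → Spec_solution n (solution n)

-- ===== LEMMAS AND PROOFS =====

lemma pv_main_iff (N m : ℕ) (hm : 1 ≤ m) :
    (m*(m-1)/2 < N ∧ (N - m*(m-1)/2) % m = 0) ↔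
    (2*N % m = 0 ∧ m*m < 2*N ∧ (m + 2*N/m) % 2 = 1) := by
  obtain ⟨m', rfl⟩ : ∃ m', m = m' + 1 := ⟨m - 1, by omega⟩
  have hP : (m'+1)*((m'+1)-1) = (m'+1)*m' := by simp
  have hev : 2 * ((m'+1)*m'/2) = (m'+1)*m' := by
    refine Nat.two_mul_div_two_of_even ?_
    rw [mul_comm]; exact Nat.even_mul_succ_self m'
  rw [hP]
  set T := (m'+1)*m'/2 with hT
  constructor
  · rintro ⟨h1, h2⟩
    have hdvd : (m'+1) ∣ (N - T) := (Nat.dvd_of_mod_eq_zero h2)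
    obtain ⟨a, ha⟩ := hdvd
    have ha1 : 1 ≤ a := by
      rcases Nat.eq_zero_or_pos a with h|h
      · rw [h, mul_zero] at ha; omega
      · exact h
    have key : 2*N = (m'+1)*(m'+2*a) := by
      have e3 : (m'+1)*(m'+2*a) = (m'+1)*m' + 2*((m'+1)*a) := by ring
      omega
    refine ⟨?_, ?_, ?_⟩
    · rw [key]; exact Nat.mul_mod_right _ _
    · nlinarith [key, ha1]
    · have hq : 2*N/(m'+1) = m'+2*a := by
        rw [key]; exact Nat.mul_div_cancel_left _ (by omega)
      rw [hq]; omega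
  · rintro ⟨h1, h2, h3⟩
    have hdvd : (m'+1) ∣ 2*N := Nat.dvd_of_mod_eq_zero h1
    set k := 2*N/(m'+1) with hk
    have hkk : (m'+1) * k = 2*N := Nat.mul_div_cancel' hdvd
    have hmk : m'+1 < k := by
      by_contra h
      push Not at h
      have : (m'+1) * k ≤ (m'+1) * (m'+1) := Nat.mul_le_mul_left _ h
      omega
    obtain ⟨a, ha1, ha2⟩ : ∃ a, 1 ≤ a ∧ k = m' + 2*a := by
      refine ⟨(k - m')/2, by omega, ?_⟩
      omega
    have key : 2*N = (m'+1)*m' + 2*((m'+1)*a) := by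
      have e3 : (m'+1)*(m'+2*a) = (m'+1)*m' + 2*((m'+1)*a) := by ring
      rw [ha2] at hkk
      omega
    have hpos : 1 ≤ (m'+1)*a := Nat.one_le_iff_ne_zero.mpr (by positivity)
    constructor
    · omega
    · have hNT : N - T = (m'+1)*a := by omega
      rw [hNT]
      exact Nat.mul_mod_right _ _

lemma pv_odd_dvd (t M : ℕ) (h : t % 2 = 1) (hd : t ∣ 2*M) : t ∣ M := by
  have hc : Nat.Coprime t 2 := by
    rw [Nat.coprime_two_right, Nat.odd_iff]; exact h
  exact hc.dvd_of_dvd_mul_left hd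

lemma pv_div_exact (a b c : ℕ) (h : a * b = c) (ha : 0 < a) : c / a = b := by
  rw [← h]; exact Nat.mul_div_cancel_left b ha

lemma pv_card_F_eq_D (N : ℕ) (hN : 1 ≤ N) :
    ((Finset.Ico 1 (N+1)).filter (fun m => 2*N % m = 0 ∧ m*m < 2*N ∧ (m + 2*N/m) % 2 = 1)).card
  = ((Finset.Ico 1 (N+1)).filter (fun t => t % 2 = 1 ∧ N % t = 0)).card := by
  apply Finset.card_nbij' (fun m => if m % 2 = 1 then m else 2*N/m) (fun t => min t (2*N/t))
  · -- maps forward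
    intro m hm
    simp only [Finset.coe_filter, Finset.mem_Ico, Set.mem_setOf_eq] at hm ⊢
    obtain ⟨⟨hm1, hmN⟩, hmod, hsq, hpar⟩ := hm
    have hdvd : m ∣ 2*N := Nat.dvd_of_mod_eq_zero hmod
    set k := 2*N/m with hk
    have hkk : m * k = 2*N := Nat.mul_div_cancel' hdvd
    have hmk : m < k := by
      by_contra h
      push Not at h
      have : m * k ≤ m * m := Nat.mul_le_mul_left _ h
      omega
    by_cases ho : m % 2 = 1
    · rw [if_pos ho]
      exact ⟨⟨hm1, hmN⟩, ho, Nat.mod_eq_zero_of_dvd (pv_odd_dvd m N ho hdvd)⟩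
    · rw [if_neg ho]
      have hko : k % 2 = 1 := by omega
      have hkd : k ∣ 2*N := ⟨m, by rw [Nat.mul_comm k m]; omega⟩
      have hkN : k ≤ N := by
        have : 2 * k ≤ m * k := Nat.mul_le_mul_right _ (by omega)
        omega
      exact ⟨⟨by omega, by omega⟩, hko, Nat.mod_eq_zero_of_dvd (pv_odd_dvd k N hko hkd)⟩
  · -- maps backward
    intro t ht
    simp only [Finset.coe_filter, Finset.mem_Ico, Set.mem_setOf_eq] at ht ⊢
    obtain ⟨⟨ht1, htN⟩, hto, htd⟩ := ht
    have hdvd : t ∣ N := Nat.dvd_of_mod_eq_zero htd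
    set u := N/t with hu
    have huu : t * u = N := Nat.mul_div_cancel' hdvd
    have hu1 : 1 ≤ u := by
      rcases Nat.eq_zero_or_pos u with h|h
      · rw [h, mul_zero] at huu; omega
      · exact h
    have hr1 : t*(2*u) = 2*(t*u) := by ring
    have hr2 : (2*u)*t = 2*(t*u) := by ring
    have he : 2*N/t = 2*u := pv_div_exact t (2*u) (2*N) (by omega) (by omega)
    rw [he]
    have hne : t ≠ 2*u := by omega
    rcases Nat.lt_or_ge t (2*u) with hlt|hge
    · rw [min_eq_left (le_of_lt hlt)]
      have hsq : t*t < t*(2*u) := mul_lt_mul_of_pos_left hlt (by omega)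
      refine ⟨⟨ht1, htN⟩, Nat.mod_eq_zero_of_dvd ⟨2*u, by omega⟩, by omega, ?_⟩
      rw [he]; omega
    · rw [min_eq_right (by omega)]
      have hlt2 : 2*u < t := by omega
      have hsq : (2*u)*(2*u) < (2*u)*t := mul_lt_mul_of_pos_left hlt2 (by omega)
      have hq : 2*N/(2*u) = t := pv_div_exact (2*u) t (2*N) (by omega) (by omega)
      refine ⟨⟨by omega, by omega⟩, Nat.mod_eq_zero_of_dvd ⟨t, by omega⟩, by omega, ?_⟩
      rw [hq]; omega
  · -- left inverse
    intro m hm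
    simp only [Finset.coe_filter, Finset.mem_Ico, Set.mem_setOf_eq] at hm
    obtain ⟨⟨hm1, hmN⟩, hmod, hsq, hpar⟩ := hm
    dsimp only
    have hdvd : m ∣ 2*N := Nat.dvd_of_mod_eq_zero hmod
    set k := 2*N/m with hk
    have hkk : m * k = 2*N := Nat.mul_div_cancel' hdvd
    have hmk : m < k := by
      by_contra h
      push Not at h
      have : m * k ≤ m * m := Nat.mul_le_mul_left _ h
      omega
    by_cases ho : m % 2 = 1
    · rw [if_pos ho, ← hk, min_eq_left (le_of_lt hmk)]
    · rw [if_neg ho]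
      have hq : 2*N/k = m := pv_div_exact k m (2*N) (by rw [Nat.mul_comm k m]; exact hkk) (by omega)
      rw [hq, min_eq_right (le_of_lt hmk)]
  · -- right inverse
    intro t ht
    simp only [Finset.coe_filter, Finset.mem_Ico, Set.mem_setOf_eq] at ht
    obtain ⟨⟨ht1, htN⟩, hto, htd⟩ := ht
    dsimp only
    have hdvd : t ∣ N := Nat.dvd_of_mod_eq_zero htd
    set u := N/t with hu
    have huu : t * u = N := Nat.mul_div_cancel' hdvd
    have hu1 : 1 ≤ u := by
      rcases Nat.eq_zero_or_pos u with h|h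
      · rw [h, mul_zero] at huu; omega
      · exact h
    have hr1 : t*(2*u) = 2*(t*u) := by ring
    have hr2 : (2*u)*t = 2*(t*u) := by ring
    have he : 2*N/t = 2*u := pv_div_exact t (2*u) (2*N) (by omega) (by omega)
    rw [he]
    rcases Nat.lt_or_ge t (2*u) with hlt|hge
    · rw [min_eq_left (le_of_lt hlt), if_pos hto]
    · rw [min_eq_right (by omega)]
      rw [if_neg (by omega)]
      exact pv_div_exact (2*u) t (2*N) (by omega) (by omega)

lemma pv_div_exact' (a b c : ℕ) (h : a * b = c) (ha : 0 < a) : c / a = b := by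
  rw [← h]; exact Nat.mul_div_cancel_left b ha

lemma pv_card_D_split (N : ℕ) (hN : 1 ≤ N) :
    ((Finset.Ico 1 (N+1)).filter (fun t => t % 2 = 1 ∧ N % t = 0)).card
  = ((Finset.Ico 1 (N+1)).filter (fun d => d*d ≤ N ∧ N % d = 0 ∧ d % 2 = 1)).card
  + ((Finset.Ico 1 (N+1)).filter (fun d => d*d ≤ N ∧ N % d = 0 ∧ N/d ≠ d ∧ N/d % 2 = 1)).card := by
  rw [← Finset.card_filter_add_card_filter_not (p := fun t => t*t ≤ N)
        (s := (Finset.Ico 1 (N+1)).filter (fun t => t % 2 = 1 ∧ N % t = 0))]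
  congr 1
  · -- small part equals S1
    congr 1
    rw [Finset.filter_filter]
    apply Finset.filter_congr
    intro x _
    constructor
    · rintro ⟨⟨h1, h2⟩, h3⟩; exact ⟨h3, h2, h1⟩
    · rintro ⟨h1, h2, h3⟩; exact ⟨⟨h3, h2⟩, h1⟩
  · -- large part in bijection with S2 via t ↦ N/t
    rw [Finset.filter_filter]
    apply Finset.card_nbij' (fun t => N/t) (fun d => N/d)
    · intro t ht
      simp only [Finset.coe_filter, Finset.mem_Ico, Set.mem_setOf_eq] at ht ⊢
      obtain ⟨⟨ht1, htN⟩, ⟨hto, htd⟩, hbig⟩ := ht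
      have hdvd : t ∣ N := Nat.dvd_of_mod_eq_zero htd
      set u := N/t with hu
      have huu : t * u = N := Nat.mul_div_cancel' hdvd
      have hu1 : 1 ≤ u := by
        rcases Nat.eq_zero_or_pos u with h|h
        · rw [h, mul_zero] at huu; omega
        · exact h
      have hut : u < t := by
        by_contra h
        push Not at h
        have : t * t ≤ t * u := Nat.mul_le_mul_left _ h
        omega
      have husq : u * u < u * t := mul_lt_mul_of_pos_left hut (by omega)
      have hcomm : u * t = t * u := Nat.mul_comm u t
      have hq : N / u = t := pv_div_exact' u t N (by omega) (by omega)
      refine ⟨⟨by omega, by omega⟩, by omega, Nat.mod_eq_zero_of_dvd ⟨t, by omega⟩, ?_, ?_⟩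
      · rw [hq]; omega
      · rw [hq]; exact hto
    · intro d hd
      simp only [Finset.coe_filter, Finset.mem_Ico, Set.mem_setOf_eq] at hd ⊢
      obtain ⟨⟨hd1, hdN⟩, hsq, hmod, hne, hqo⟩ := hd
      have hdvd : d ∣ N := Nat.dvd_of_mod_eq_zero hmod
      set q := N/d with hq
      have hqq : d * q = N := Nat.mul_div_cancel' hdvd
      have hq1 : 1 ≤ q := by
        rcases Nat.eq_zero_or_pos q with h|h
        · rw [h, mul_zero] at hqq; omega
        · exact h
      have hdq : d < q := by
        rcases Nat.lt_or_ge d q with h|h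
        · exact h
        · have h2 : q < d := by omega
          have : d * q < d * d := mul_lt_mul_of_pos_left h2 (by omega)
          omega
      have hcomm : q * d = d * q := Nat.mul_comm q d
      have hqsq : q * d < q * q := mul_lt_mul_of_pos_left hdq (by omega)
      have hqN : q ≤ N := Nat.le_of_dvd (by omega) ⟨d, by omega⟩
      exact ⟨⟨by omega, by omega⟩, ⟨hqo, Nat.mod_eq_zero_of_dvd ⟨d, by omega⟩⟩, by omega⟩
    · intro t ht
      simp only [Finset.coe_filter, Finset.mem_Ico, Set.mem_setOf_eq] at ht
      obtain ⟨⟨ht1, htN⟩, ⟨hto, htd⟩, hbig⟩ := ht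
      dsimp only
      have hdvd : t ∣ N := Nat.dvd_of_mod_eq_zero htd
      have huu : t * (N/t) = N := Nat.mul_div_cancel' hdvd
      have hu1 : 1 ≤ N/t := by
        rcases Nat.eq_zero_or_pos (N/t) with h|h
        · rw [h, mul_zero] at huu; omega
        · exact h
      have hcomm : (N/t) * t = t * (N/t) := Nat.mul_comm _ _
      exact pv_div_exact' (N/t) t N (by omega) (by omega)
    · intro d hd
      simp only [Finset.coe_filter, Finset.mem_Ico, Set.mem_setOf_eq] at hd
      obtain ⟨⟨hd1, hdN⟩, hsq, hmod, hne, hqo⟩ := hd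
      dsimp only
      have hdvd : d ∣ N := Nat.dvd_of_mod_eq_zero hmod
      have hqq : d * (N/d) = N := Nat.mul_div_cancel' hdvd
      have hq1 : 1 ≤ N/d := by
        rcases Nat.eq_zero_or_pos (N/d) with h|h
        · rw [h, mul_zero] at hqq; omega
        · exact h
      have hcomm : (N/d) * d = d * (N/d) := Nat.mul_comm _ _
      exact pv_div_exact' (N/d) d N (by omega) (by omega)

lemma pv_loopA (N : ℕ) (hN : 1 ≤ N) :
    ∀ (fuel : ℕ) (j : ℕ) (c : ℤ), N + 1 - j ≤ fuel →
    solutionLoop (N:ℤ) c ((j:ℤ)+1) fuel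
  = c + ∑ m ∈ Finset.Ico (j+1) (N+1),
      (if m*(m-1)/2 < N ∧ (N - m*(m-1)/2) % m = 0 then (1:ℤ) else 0) := by
  intro fuel
  induction fuel with
  | zero =>
    intro j c hf
    rw [Finset.Ico_eq_empty (by omega), Finset.sum_empty, solutionLoop]
    ring
  | succ fuel ih =>
    intro j c hf
    have e1 : ((j:ℤ)+1) * ((j:ℤ)+1-1) = (((j+1)*j : ℕ) : ℤ) := by push_cast; ring
    have e2 : PySem.Int.floordiv ((((j+1)*j : ℕ)) : ℤ) 2 = (((j+1)*j/2 : ℕ) : ℤ) := by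
      exact_mod_cast PySem.Int.floordiv_natCast ((j+1)*j) 2
    rw [solutionLoop]
    simp only [e1, e2]
    by_cases hc : (((j+1)*j/2 : ℕ) : ℤ) < (N:ℤ)
    · rw [if_pos hc]
      have hT : (j+1)*j/2 < N := by exact_mod_cast hc
      have hjN : j + 1 ≤ N := by
        by_contra h'
        push Not at h'
        have hmul : (N+1)*N ≤ (j+1)*j := Nat.mul_le_mul (by omega) (by omega)
        have h2 : N ≤ (j+1)*j/2 := by
          rw [Nat.le_div_iff_mul_le (by omega)]
          nlinarith
        omega
      have e3 : ((N:ℤ) - (((j+1)*j/2 : ℕ) : ℤ)) = (((N - (j+1)*j/2 : ℕ)) : ℤ) := by omega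
      have e4 : ((j:ℤ)+1) = (((j+1 : ℕ)) : ℤ) := by push_cast; ring
      rw [e3, e4, PySem.Int.mod_natCast, ih (j+1) _ (by omega),
          Finset.sum_eq_sum_Ico_succ_bot (by omega : j+1 < N+1)]
      have hcmp : (j+1)*((j+1)-1)/2 = (j+1)*j/2 := by simp
      rw [hcmp]
      simp only [Nat.cast_eq_zero]
      split_ifs with h1 h2 h2
      · ring
      · exact absurd ⟨hT, h1⟩ h2
      · exact absurd h2.2 h1
      · ring
    · rw [if_neg hc]
      have hT : N ≤ (j+1)*j/2 := by
        have := not_lt.mp hc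
        exact_mod_cast this
      have hsum : ∑ m ∈ Finset.Ico (j+1) (N+1),
          (if m*(m-1)/2 < N ∧ (N - m*(m-1)/2) % m = 0 then (1:ℤ) else 0) = 0 := by
        apply Finset.sum_eq_zero
        intro x hx
        simp only [Finset.mem_Ico] at hx
        rw [if_neg]
        rintro ⟨h1, -⟩
        have hmono : (j+1)*j ≤ x*(x-1) := Nat.mul_le_mul (by omega) (by omega)
        have : (j+1)*j/2 ≤ x*(x-1)/2 := Nat.div_le_div_right hmono
        omega
      rw [hsum]
      ring

lemma pv_loopB (N : ℕ) (hN : 1 ≤ N) :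
    ∀ (fuel : ℕ) (d : ℕ) (c : ℤ), 1 ≤ d → N + 2 - d ≤ fuel →
    solutionAltLoop (N:ℤ) c (d:ℤ) fuel
  = c + ∑ m ∈ Finset.Ico d (N+1),
      ((if m*m ≤ N ∧ N % m = 0 ∧ m % 2 = 1 then (1:ℤ) else 0)
       + (if m*m ≤ N ∧ N % m = 0 ∧ N/m ≠ m ∧ N/m % 2 = 1 then (1:ℤ) else 0)) := by
  intro fuel
  induction fuel with
  | zero =>
    intro d c hd hf
    rw [Finset.Ico_eq_empty (by omega), Finset.sum_empty, solutionAltLoop]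
    ring
  | succ fuel ih =>
    intro d c hd hf
    rw [solutionAltLoop]
    have edd : ((d:ℤ)) * ((d:ℤ)) = ((d*d : ℕ) : ℤ) := by push_cast; ring
    rw [edd]
    by_cases hc : ((d*d : ℕ) : ℤ) ≤ (N:ℤ)
    · rw [if_pos hc]
      have hdd : d * d ≤ N := by exact_mod_cast hc
      have hdN : d ≤ N := by
        have : d * 1 ≤ d * d := Nat.mul_le_mul_left _ hd
        omega
      have em : PySem.Int.mod (N:ℤ) (d:ℤ) = ((N % d : ℕ) : ℤ) := by
        exact_mod_cast PySem.Int.mod_natCast N d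
      have ef : PySem.Int.floordiv (N:ℤ) (d:ℤ) = ((N / d : ℕ) : ℤ) := by
        exact_mod_cast PySem.Int.floordiv_natCast N d
      have ed2 : PySem.Int.mod (d:ℤ) 2 = ((d % 2 : ℕ) : ℤ) := by
        exact_mod_cast PySem.Int.mod_natCast d 2
      have eq2 : PySem.Int.mod ((N / d : ℕ) : ℤ) 2 = ((N / d % 2 : ℕ) : ℤ) := by
        exact_mod_cast PySem.Int.mod_natCast (N/d) 2
      have e5 : ((d:ℤ)) + 1 = ((d+1 : ℕ):ℤ) := by push_cast; ring
      simp only [em, ef, ed2, eq2, e5]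
      rw [ih (d+1) _ (by omega) (by omega),
          Finset.sum_eq_sum_Ico_succ_bot (by omega : d < N+1)]
      have c1 : (((N % d : ℕ) : ℤ) = 0) ↔ N % d = 0 := by exact_mod_cast Iff.rfl
      have c2 : (((d % 2 : ℕ) : ℤ) = 1) ↔ d % 2 = 1 := by exact_mod_cast Iff.rfl
      have c3 : (((N / d : ℕ) : ℤ) ≠ ((d:ℕ) : ℤ)) ↔ N / d ≠ d := by
        constructor <;> intro hx hy <;> exact hx (by exact_mod_cast hy)
      have c4 : (((N / d % 2 : ℕ) : ℤ) = 1) ↔ N / d % 2 = 1 := by exact_mod_cast Iff.rfl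
      simp only [c1, c2, c3, c4, hdd, true_and]
      split_ifs <;> push_cast <;> ring_nf <;> omega
    · rw [if_neg hc]
      have hdd : ¬ d * d ≤ N := by
        intro hx
        exact hc (by exact_mod_cast hx)
      have hsum : ∑ m ∈ Finset.Ico d (N+1),
          ((if m*m ≤ N ∧ N % m = 0 ∧ m % 2 = 1 then (1:ℤ) else 0)
           + (if m*m ≤ N ∧ N % m = 0 ∧ N/m ≠ m ∧ N/m % 2 = 1 then (1:ℤ) else 0)) = 0 := by
        apply Finset.sum_eq_zero
        intro x hx
        simp only [Finset.mem_Ico] at hx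
        have hxx : ¬ x * x ≤ N := by
          intro hcc
          exact hdd (le_trans (Nat.mul_le_mul hx.1 hx.1) hcc)
        rw [if_neg (by tauto), if_neg (by tauto)]
        ring
      rw [hsum]
      ring

lemma pv_counts_eq (N : ℕ) (hN : 1 ≤ N) :
    (∑ m ∈ Finset.Ico 1 (N+1), (if m*(m-1)/2 < N ∧ (N - m*(m-1)/2) % m = 0 then (1:ℤ) else 0))
  = ∑ m ∈ Finset.Ico 1 (N+1),
      ((if m*m ≤ N ∧ N % m = 0 ∧ m % 2 = 1 then (1:ℤ) else 0)
       + (if m*m ≤ N ∧ N % m = 0 ∧ N/m ≠ m ∧ N/m % 2 = 1 then (1:ℤ) else 0)) := by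
  have h1 : (∑ m ∈ Finset.Ico 1 (N+1), (if m*(m-1)/2 < N ∧ (N - m*(m-1)/2) % m = 0 then (1:ℤ) else 0))
      = ∑ m ∈ Finset.Ico 1 (N+1), (if 2*N % m = 0 ∧ m*m < 2*N ∧ (m + 2*N/m) % 2 = 1 then (1:ℤ) else 0) := by
    apply Finset.sum_congr rfl
    intro m hm
    simp only [Finset.mem_Ico] at hm
    exact if_congr (pv_main_iff N m (by omega)) rfl rfl
  have h2 := (pv_card_F_eq_D N hN).trans (pv_card_D_split N hN)
  rw [h1, Finset.sum_add_distrib, Finset.sum_boole, Finset.sum_boole, Finset.sum_boole]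
  exact_mod_cast h2

-- ===== VERDICT (by name: the statement is the Claim_ definition above) =====
theorem solution_spec : Claim_equal_solution := by
  unfold Claim_equal_solution Spec_solution
  intro n _
  by_cases hn : n ≤ 0
  · unfold solution solution_alt
    rw [if_pos hn]
    have ht : n.toNat + 2 = 0 + 1 + 1 := by omega
    rw [ht, solutionLoop]
    have hfd : PySem.Int.floordiv ((1 : ℤ) * ((1 : ℤ) - 1)) 2 = 0 := by decide
    rw [if_neg (by rw [hfd]; omega)]
  · have hN : 1 ≤ n.toNat := by omega
    have hn' : n = ((n.toNat : ℕ) : ℤ) := by omega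
    rw [hn']
    unfold solution solution_alt
    rw [if_neg (by omega)]
    have ht : (((n.toNat : ℕ) : ℤ)).toNat + 2 = n.toNat + 2 := by omega
    rw [ht]
    have hA := pv_loopA n.toNat hN (n.toNat + 2) 0 0 (by omega)
    have hB := pv_loopB n.toNat hN (n.toNat + 2) 1 0 (by omega) (by omega)
    simp only [Nat.cast_zero, Nat.cast_one, zero_add] at hA hB
    rw [hA, hB]
    exact pv_counts_eq n.toNat hN
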